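-- pv_equiv track=rewrite | github.com/regstuff/researchbot | functions/utils_func.py | club_sents
-- ===== SOURCE A (Python) =====
-- def club_sents(all_sents, clubbed_wc):
--   clubbed_sents = []
--   clubbed_indexes = []
--   i = 0
--   while i < len(all_sents) - 1:
--     start_index = i
--     grouped_sent = all_sents[i]
--     count = i
--     while grouped_sent.count(' ') < clubbed_wc and count < len(all_sents) - 1:
--       count += 1
--       grouped_sent += ' ' + all_sents[count]
--     i = count+1
--     end_index = i
--     clubbed_sents.append(grouped_sent.replace('-',' '))
--     clubbed_indexes.append([start_index, end_index])
--   return clubbed_sents, clubbed_indexes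
-- ===== SOURCE B (Python) =====
-- def club_sents(all_sents, clubbed_wc):
--     # Prefix table P: P[j] = sum over the first j sentences of (1 + spaces in sentence),
--     # so the space count of ' '.join(all_sents[start:end]) is P[end] - P[start] - 1.
--     n = len(all_sents)
--     P = [0]
--     for s in all_sents:
--         P.append(P[-1] + 1 + s.count(' '))
--     clubbed_sents = []
--     clubbed_indexes = []
--     start = 0
--     while start < n - 1:
--         # smallest end in [start+1, n] with P[end] >= target (P is strictly increasing),
--         # i.e. the group's space count reaches clubbed_wc; n if never reached.
--         target = clubbed_wc + P[start] + 1
--         lo, hi = start + 1, n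
--         while lo < hi:
--             mid = (lo + hi) // 2
--             if P[mid] < target:
--                 lo = mid + 1
--             else:
--                 hi = mid
--         end = lo
--         clubbed_sents.append(' '.join(all_sents[start:end]).replace('-', ' '))
--         clubbed_indexes.append([start, end])
--         start = end
--     return clubbed_sents, clubbed_indexes
-- ===== Notes on version B (the rewrite author's own statement) =====
-- stated objective: faster
-- what changed: A regrows each group string append-by-append and re-counts all its spaces on every inner-loop test; B precomputes one prefix table P of per-sentence space counts (join cost included), finds each group's end with a hand-written binary search over P, and emits each group with a single ' '.join of the slice.
import Mathlib
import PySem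

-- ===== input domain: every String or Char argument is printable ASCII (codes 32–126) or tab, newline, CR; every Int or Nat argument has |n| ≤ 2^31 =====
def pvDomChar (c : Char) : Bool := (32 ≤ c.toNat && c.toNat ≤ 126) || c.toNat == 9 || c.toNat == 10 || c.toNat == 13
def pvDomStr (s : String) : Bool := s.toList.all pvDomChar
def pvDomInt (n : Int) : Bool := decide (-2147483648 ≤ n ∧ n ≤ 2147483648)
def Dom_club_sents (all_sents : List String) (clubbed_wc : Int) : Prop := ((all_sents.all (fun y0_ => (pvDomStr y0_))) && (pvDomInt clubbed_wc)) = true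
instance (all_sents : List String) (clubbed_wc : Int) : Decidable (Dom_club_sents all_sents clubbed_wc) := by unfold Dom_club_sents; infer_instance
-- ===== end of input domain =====

-- B replaces A's character-by-character regrouping with a prefix table of space counts and a
-- binary search for each group's end, avoiding A's repeated re-count of the growing group string
-- (objective: faster; measured faster in a timing run).

-- ===== PORT A =====
-- inner while loop; the fuel argument (called with len(all_sents), never exhausted: count
-- grows by 1 per step and stops before len-1) only makes the recursion structural.
-- all_sents[count] is always in range in Python (count+1 ≤ len-1), so getD "" is exact.
def clubInnerA (sents : List String) (wc : Int) : Nat → List Char → Nat → List Char × Nat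
  | 0, g, count => (g, count)
  | fuel + 1, g, count =>
    if (PySem.Chars.count g [' '] : Int) < wc ∧ count + 1 < sents.length then
      clubInnerA sents wc fuel (g ++ [' '] ++ (sents.getD (count + 1) "").toList) (count + 1)
    else (g, count)

-- outer while loop; fuel = len(all_sents) bounds the iteration count (i grows every pass)
def clubOuterA (sents : List String) (wc : Int) : Nat → Nat → List String × List (List Int)
  | 0, _ => ([], [])
  | fuel + 1, i =>
    if i + 1 < sents.length then
      let r := clubInnerA sents wc sents.length (sents.getD i "").toList i
      let rest := clubOuterA sents wc fuel (r.2 + 1)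
      (String.mk (PySem.Chars.replace r.1 ['-'] [' ']) :: rest.1,
       [(i : Int), (r.2 : Int) + 1] :: rest.2)
    else ([], [])

def club_sents (all_sents : List String) (clubbed_wc : Int) : List String × List (List Int) :=
  clubOuterA all_sents clubbed_wc all_sents.length 0

-- ===== PORT B =====
-- P = [0]; for s in all_sents: P.append(P[-1] + 1 + s.count(' '))
def pfoldB (sents : List String) : List Int :=
  sents.foldl
    (fun P s => P ++ [PySem.List.pyGetD P (-1) 0 + 1 + (PySem.Chars.count s.toList [' '] : Int)])
    [0]

-- the hand-written bisect loop of Source B; fuel (called with len(all_sents) ≥ hi - lo) only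
-- makes the halving loop structural
def bsearchB (P : List Int) (target : Int) : Nat → Nat → Nat → Nat
  | 0, lo, _ => lo
  | fuel + 1, lo, hi =>
    if lo < hi then
      let mid := (lo + hi) / 2
      if PySem.List.pyGetD P (mid : Int) 0 < target then bsearchB P target fuel (mid + 1) hi
      else bsearchB P target fuel lo mid
    else lo

-- outer while loop of Source B; fuel = len(all_sents) bounds the iteration count
def clubOuterB (sents : List String) (wc : Int) (P : List Int) :
    Nat → Nat → List String × List (List Int)
  | 0, _ => ([], [])
  | fuel + 1, start =>
    if start + 1 < sents.length then
      let e := bsearchB P (wc + PySem.List.pyGetD P (start : Int) 0 + 1) sents.length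
        (start + 1) sents.length
      let rest := clubOuterB sents wc P fuel e
      (String.mk (PySem.Chars.replace
          (PySem.Chars.join [' ']
            ((PySem.List.slice sents (some (start : Int)) (some (e : Int))).map String.toList))
          ['-'] [' ']) :: rest.1,
       [(start : Int), (e : Int)] :: rest.2)
    else ([], [])

def club_sents_alt (all_sents : List String) (clubbed_wc : Int) : List String × List (List Int) :=
  clubOuterB all_sents clubbed_wc (pfoldB all_sents) all_sents.length 0

-- ===== PRECONDITION & SPEC =====
def Spec_club_sents (all_sents : List String) (clubbed_wc : Int) (out : List String × List (List Int)) : Prop := out = club_sents_alt all_sents clubbed_wc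
instance (all_sents : List String) (clubbed_wc : Int) (out : List String × List (List Int)) : Decidable (Spec_club_sents all_sents clubbed_wc out) := by unfold Spec_club_sents; infer_instance

-- ===== CLAIM (what is proved, stated in full; the proofs are below) =====
def Claim_equal_club_sents : Prop := ∀ (all_sents : List String) (clubbed_wc : Int), Dom_club_sents all_sents clubbed_wc → Spec_club_sents all_sents clubbed_wc (club_sents all_sents clubbed_wc)

-- ===== LEMMAS AND PROOFS =====

-- spaces in one sentence, as an Int
def cntI (s : String) : Int := (PySem.Chars.count s.toList [' '] : Int)

-- Sf sents j = j + total spaces of the first j sentences (the value of P[j])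
def Sf (sents : List String) (j : Nat) : Int := (j : Int) + ((sents.take j).map cntI).sum

-- counting a single character is List.count (count.go with a one-character needle)
theorem go_count (c : Char) : ∀ (fuel : Nat) (l : List Char) (acc : Nat), l.length ≤ fuel →
    PySem.Chars.count.go [c] fuel l acc = acc + l.count c := by
  intro fuel
  induction fuel with
  | zero =>
    intro l acc h
    have : l = [] := by cases l <;> simp_all
    subst this; simp [PySem.Chars.count.go]
  | succ n ih =>
    intro l acc h
    cases l with
    | nil => simp [PySem.Chars.count.go]
    | cons hd t =>
      rw [PySem.Chars.count.go]
      have hpre : List.isPrefixOf [c] (hd :: t) = (c == hd) := by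
        simp [List.isPrefixOf]
      rw [hpre]
      by_cases hc : c = hd
      · subst hc
        simp only [beq_self_eq_true, if_true, List.length_nil, List.drop_succ_cons,
          List.drop_zero, List.length_cons]
        rw [ih t (acc + 1) (by simpa using h)]
        simp
        omega
      · have : (c == hd) = false := by simpa using hc
        rw [this]
        simp only [if_false, Bool.false_eq_true]
        rw [ih t acc (by simpa using h)]
        simp [Ne.symm hc]

theorem count_singleton_char (s : List Char) (c : Char) :
    PySem.Chars.count s [c] = s.count c := by
  rw [PySem.Chars.count]
  simp [go_count c s.length s 0 le_rfl]

theorem Sf_succ (sents : List String) (j : Nat) (h : j < sents.length) :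
    Sf sents (j + 1) = Sf sents j + 1 + cntI (sents.getD j "") := by
  unfold Sf
  have ht : sents.take (j + 1) = sents.take j ++ [sents[j]] := by
    rw [List.take_add_one]; simp [h]
  rw [ht]
  simp [List.getD, h]
  ring

theorem Sf_mono (sents : List String) (i j : Nat) (hij : i ≤ j) :
    Sf sents i ≤ Sf sents j := by
  unfold Sf
  have ht : sents.take j = sents.take i ++ (sents.take j).drop i := by
    conv_lhs => rw [← List.take_append_drop i (sents.take j)]
    rw [List.take_take, Nat.min_eq_left hij]
  rw [ht]
  have h0 : 0 ≤ (((sents.take j).drop i).map cntI).sum := by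
    apply List.sum_nonneg
    intro x hx
    obtain ⟨s, _, rfl⟩ := List.mem_map.mp hx
    unfold cntI; positivity
  simp only [List.map_append, List.sum_append]
  have : (i : Int) ≤ (j : Int) := by exact_mod_cast hij
  omega

-- the foldl in pfoldB is a scan
def pvScan (a : Int) : List String → List Int
  | [] => []
  | s :: ss => (a + 1 + cntI s) :: pvScan (a + 1 + cntI s) ss

theorem pfold_aux (ss : List String) : ∀ (acc : List Int) (h : acc ≠ []),
    ss.foldl (fun P s => P ++ [PySem.List.pyGetD P (-1) 0 + 1 + (PySem.Chars.count s.toList [' '] : Int)]) acc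
      = acc ++ pvScan (acc.getLast h) ss := by
  induction ss with
  | nil => intro acc h; simp [pvScan]
  | cons s ss ih =>
    intro acc h
    simp only [List.foldl_cons]
    rw [PySem.List.pyGetD_neg_one acc 0 h]
    rw [ih (acc ++ [acc.getLast h + 1 + (PySem.Chars.count s.toList [' '] : Int)]) (by simp)]
    rw [List.getLast_append_singleton]
    simp [pvScan, cntI]

theorem pfoldB_eq (sents : List String) : pfoldB sents = 0 :: pvScan 0 sents := by
  unfold pfoldB
  rw [pfold_aux sents [0] (by simp)]
  simp

theorem pvScan_getElem : ∀ (ss : List String) (a : Int) (j : Nat), j < ss.length →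
    (pvScan a ss)[j]? = some (a + (j + 1 : Int) + ((ss.take (j + 1)).map cntI).sum) := by
  intro ss
  induction ss with
  | nil => intro a j h; simp at h
  | cons s ss ih =>
    intro a j h
    cases j with
    | zero => simp [pvScan]
    | succ k =>
      simp only [pvScan, List.getElem?_cons_succ]
      rw [ih _ k (by simpa using h)]
      simp [List.take_succ_cons]
      ring

theorem pfoldB_getD (sents : List String) (j : Nat) (h : j ≤ sents.length) :
    (pfoldB sents).getD j 0 = Sf sents j := by
  rw [pfoldB_eq]
  cases j with
  | zero => simp [Sf]
  | succ k =>
    have hk : k < sents.length := by omega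
    simp only [List.getD, List.getElem?_cons_succ]
    rw [pvScan_getElem sents 0 k hk]
    simp [Sf]

-- the search result stays in [lo, hi]
theorem bsearchB_bounds (P : List Int) (t : Int) :
    ∀ (fuel lo hi : Nat), lo ≤ hi →
      lo ≤ bsearchB P t fuel lo hi ∧ bsearchB P t fuel lo hi ≤ hi := by
  intro fuel
  induction fuel with
  | zero => intro lo hi h; simp [bsearchB]; omega
  | succ n ih =>
    intro lo hi h
    rw [bsearchB]
    split
    case isTrue hlt =>
      dsimp only
      split
      case isTrue hP => have := ih ((lo + hi) / 2 + 1) hi (by omega); omega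
      case isFalse hP => have := ih lo ((lo + hi) / 2) (by omega); omega
    case isFalse hlt => omega

-- bisect_left characterisation of the hand-written search
theorem bsearchB_spec (P : List Int) (t : Int) (n : Nat)
    (mono : ∀ i j : Nat, i ≤ j → j ≤ n → P.getD i 0 ≤ P.getD j 0) :
    ∀ (fuel lo hi : Nat), lo ≤ hi → hi ≤ n → hi - lo ≤ fuel →
      (∀ m, lo ≤ m → m < bsearchB P t fuel lo hi → P.getD m 0 < t) ∧
        (bsearchB P t fuel lo hi < hi → t ≤ P.getD (bsearchB P t fuel lo hi) 0) := by
  intro fuel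
  induction fuel with
  | zero =>
    intro lo hi hle hn hf
    have : hi = lo := by omega
    subst this
    simp only [bsearchB]
    exact ⟨fun m hm hmr => by omega, fun hr => by omega⟩
  | succ k ih =>
    intro lo hi hle hn hf
    rw [bsearchB]
    split
    case isTrue hlt =>
      dsimp only
      split
      case isTrue hP =>
        rw [PySem.List.pyGetD_natCast] at hP
        have ihs := ih ((lo + hi) / 2 + 1) hi (by omega) hn (by omega)
        refine ⟨?_, ihs.2⟩
        intro m hm hmr
        by_cases hc : m ≤ (lo + hi) / 2
        · exact lt_of_le_of_lt (mono m ((lo + hi) / 2) hc (by omega)) hP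
        · exact ihs.1 m (by omega) hmr
      case isFalse hP =>
        rw [PySem.List.pyGetD_natCast] at hP
        have hP2 : t ≤ P.getD ((lo + hi) / 2) 0 := by omega
        have ihs := ih lo ((lo + hi) / 2) (by omega) (by omega) (by omega)
        refine ⟨ihs.1, ?_⟩
        intro hr
        have hb := bsearchB_bounds P t k lo ((lo + hi) / 2) (by omega)
        by_cases hc : bsearchB P t k lo ((lo + hi) / 2) < (lo + hi) / 2
        · exact ihs.2 hc
        · have : bsearchB P t k lo ((lo + hi) / 2) = (lo + hi) / 2 := by omega
          rw [this]; exact hP2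
    case isFalse hlt =>
      exact ⟨fun m hm hmr => by omega, fun hr => by omega⟩

-- the group string all_sents[start] + ' ' + … + all_sents[c], as B builds it
def joinSeg (sents : List String) (start c : Nat) : List Char :=
  PySem.Chars.join [' '] (((sents.drop start).take (c + 1 - start)).map String.toList)

theorem join_concat (sep : List Char) (xs : List (List Char)) (y : List Char) (h : xs ≠ []) :
    PySem.Chars.join sep (xs ++ [y]) = PySem.Chars.join sep xs ++ sep ++ y := by
  induction xs with
  | nil => simp at h
  | cons p rest ih =>
    cases rest with
    | nil => simp [PySem.Chars.join_singleton, PySem.Chars.join_cons_cons]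
    | cons q rs =>
      have e : (p :: q :: rs) ++ [y] = p :: q :: (rs ++ [y]) := by simp
      have ih' := ih (by simp)
      rw [List.cons_append] at ih'
      rw [e, PySem.Chars.join_cons_cons, ih', PySem.Chars.join_cons_cons]
      simp

theorem joinSeg_base (sents : List String) (start : Nat) (h : start < sents.length) :
    joinSeg sents start start = (sents.getD start "").toList := by
  unfold joinSeg
  have h1 : start + 1 - start = 1 := by omega
  rw [h1]
  have hone : ((sents.drop start).take 1).map String.toList = [sents[start].toList] := by
    rw [List.drop_eq_getElem_cons h]
    rfl
  rw [hone, PySem.Chars.join_singleton]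
  simp [List.getD, h]

theorem joinSeg_succ (sents : List String) (start c : Nat) (hsc : start ≤ c)
    (h : c + 1 < sents.length) :
    joinSeg sents start (c + 1)
      = joinSeg sents start c ++ [' '] ++ (sents.getD (c + 1) "").toList := by
  unfold joinSeg
  have h1 : c + 1 + 1 - start = (c + 1 - start) + 1 := by omega
  rw [h1, List.take_add_one]
  have hg : (sents.drop start)[c + 1 - start]? = some sents[c + 1] := by
    rw [List.getElem?_drop]
    have : start + (c + 1 - start) = c + 1 := by omega
    rw [this]
    simp [h]
  rw [hg]
  simp only [Option.toList_some, List.map_append, List.map_cons, List.map_nil]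
  rw [join_concat _ _ _ (by
    have hlen : (sents.drop start).take (c + 1 - start) ≠ [] := by
      have : (sents.drop start).length = sents.length - start := by simp
      apply List.ne_nil_of_length_pos
      rw [List.length_take]
      omega
    simpa using hlen)]
  simp [List.getD, h]

theorem count_joinSeg (sents : List String) (start : Nat) :
    ∀ c, start ≤ c → c < sents.length →
    (PySem.Chars.count (joinSeg sents start c) [' '] : Int)
      = Sf sents (c + 1) - Sf sents start - 1 := by
  intro c
  induction c with
  | zero =>
    intro h0 hlen
    have : start = 0 := by omega
    subst this
    rw [joinSeg_base sents 0 hlen, Sf_succ sents 0 hlen]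
    simp [cntI]
    ring
  | succ k ih =>
    intro hk hlen
    by_cases hs : start = k + 1
    · subst hs
      rw [joinSeg_base sents (k+1) hlen, Sf_succ sents (k+1) hlen]
      simp [cntI]
      ring
    · have hsk : start ≤ k := by omega
      rw [joinSeg_succ sents start k hsk hlen]
      rw [count_singleton_char]
      simp only [List.count_append]
      rw [← count_singleton_char (joinSeg sents start k) ' ',
        ← count_singleton_char (sents.getD (k+1) "").toList ' ']
      rw [Sf_succ sents (k+1) hlen]
      push_cast
      rw [ih hsk (by omega)]
      simp [cntI]
      ring

-- full characterisation of A's inner loop from the canonical state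
theorem innerA_spec (sents : List String) (wc : Int) (start : Nat) :
    ∀ (fuel count : Nat), start ≤ count → count < sents.length →
      sents.length ≤ fuel + count + 1 →
    (clubInnerA sents wc fuel (joinSeg sents start count) count).1
        = joinSeg sents start (clubInnerA sents wc fuel (joinSeg sents start count) count).2 ∧
      count ≤ (clubInnerA sents wc fuel (joinSeg sents start count) count).2 ∧
      (clubInnerA sents wc fuel (joinSeg sents start count) count).2 < sents.length ∧
      (∀ m, count ≤ m → m < (clubInnerA sents wc fuel (joinSeg sents start count) count).2 →
        Sf sents (m + 1) - Sf sents start - 1 < wc) ∧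
      ((clubInnerA sents wc fuel (joinSeg sents start count) count).2 + 1 = sents.length ∨
        wc ≤ Sf sents ((clubInnerA sents wc fuel (joinSeg sents start count) count).2 + 1)
          - Sf sents start - 1) := by
  intro fuel
  induction fuel with
  | zero =>
    intro count h1 h2 hf
    dsimp [clubInnerA]
    exact ⟨rfl, le_rfl, h2, fun m hm hmr => by omega, Or.inl (by omega)⟩
  | succ k ih =>
    intro count h1 h2 hf
    rw [clubInnerA]
    split
    case isTrue hcond =>
      have hwc : Sf sents (count + 1) - Sf sents start - 1 < wc := by
        have := count_joinSeg sents start count h1 h2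
        omega
      have hjs : joinSeg sents start count ++ [' '] ++ (sents.getD (count + 1) "").toList
          = joinSeg sents start (count + 1) :=
        (joinSeg_succ sents start count h1 hcond.2).symm
      rw [hjs]
      have ihs := ih (count + 1) (by omega) hcond.2 (by omega)
      refine ⟨ihs.1, by omega, ihs.2.2.1, ?_, ihs.2.2.2.2⟩
      intro m hm hmr
      by_cases hc : m = count
      · subst hc; exact hwc
      · exact ihs.2.2.2.1 m (by omega) hmr
    case isFalse hcond =>
      dsimp only
      refine ⟨rfl, le_rfl, h2, fun m hm hmr => by omega, ?_⟩
      rw [Decidable.not_and_iff_or_not] at hcond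
      rcases hcond with hc | hc
      · right
        have := count_joinSeg sents start count h1 h2
        omega
      · left; omega

-- A and B consume one fuel unit per emitted group, so they stay in lockstep
theorem outer_eq (sents : List String) (wc : Int) :
    ∀ (fuel start : Nat), clubOuterA sents wc fuel start
      = clubOuterB sents wc (pfoldB sents) fuel start := by
  intro fuel
  induction fuel with
  | zero => intro start; rfl
  | succ k ih =>
    intro start
    rw [clubOuterA, clubOuterB]
    split
    case isTrue h =>
      dsimp only
      have hstart : start < sents.length := by omega
      have hbase : (sents.getD start "").toList = joinSeg sents start start :=
        (joinSeg_base sents start hstart).symm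
      rw [hbase]
      have spec := innerA_spec sents wc start sents.length start le_rfl hstart (by omega)
      set c := (clubInnerA sents wc sents.length (joinSeg sents start start) start).2 with hc
      have mono : ∀ i j : Nat, i ≤ j → j ≤ sents.length →
          (pfoldB sents).getD i 0 ≤ (pfoldB sents).getD j 0 := by
        intro i j hij hj
        rw [pfoldB_getD sents i (by omega), pfoldB_getD sents j hj]
        exact Sf_mono sents i j hij
      have hPstart : PySem.List.pyGetD (pfoldB sents) (start : Int) 0 = Sf sents start := by
        rw [PySem.List.pyGetD_natCast]
        exact pfoldB_getD sents start (by omega)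
      set t := wc + PySem.List.pyGetD (pfoldB sents) (start : Int) 0 + 1 with ht
      set e := bsearchB (pfoldB sents) t sents.length (start + 1) sents.length with he
      have hb := bsearchB_bounds (pfoldB sents) t sents.length (start + 1) sents.length (by omega)
      have hsp := bsearchB_spec (pfoldB sents) t sents.length mono sents.length
        (start + 1) sents.length (by omega) le_rfl (by omega)
      have hce : e = c + 1 := by
        by_contra hne
        by_cases hlt : e < c + 1
        · have he1 : e ≤ c := by omega
          have helen : e < sents.length := by omega
          have hte := hsp.2 (by omega)
          rw [pfoldB_getD sents e (by omega)] at hte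
          have hm := spec.2.2.2.1 (e - 1) (by omega) (by omega)
          have : e - 1 + 1 = e := by omega
          rw [this] at hm
          rw [hPstart] at ht
          omega
        · have hm := hsp.1 (c + 1) (by omega) (by omega)
          rw [pfoldB_getD sents (c + 1) (by omega)] at hm
          rw [hPstart] at ht
          rcases spec.2.2.2.2 with hend | hfull
          · omega
          · omega
      have hslice : PySem.List.slice sents (some (start : Int)) (some (e : Int))
          = (sents.drop start).take (e - start) := PySem.List.slice_natCast sents start e
      rw [spec.1, hslice, hce, ih]
      simp only [joinSeg]
      push_cast
      rfl
    case isFalse h =>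
      rfl

-- ===== VERDICT (by name: the statement is the Claim_ definition above) =====
theorem club_sents_spec : Claim_equal_club_sents := by
  intro all_sents clubbed_wc _
  unfold Spec_club_sents club_sents club_sents_alt
  exact outer_eq all_sents clubbed_wc all_sents.length 0
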